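-- pv_equiv track=rewrite | github.com/tschloss/Golf-Zock-GCMV | zock.py | prettymatch
-- ===== SOURCE A (Python) =====
-- def prettymatch(holes):
-- 	prettystring=''
-- 	resulttxt=''
-- 	i=0
-- 	match=0
-- 	for hole in holes:
-- 		match += hole
--
--
-- 		if hole<0:
-- 			prettystring += '▼'
-- 		elif hole>0:
-- 			prettystring += '▲'
-- 		else:
-- 			prettystring += '◦'
--
-- 		if i in (2,5): prettystring += ' '
-- 		i+=1
--
-- 		if resulttxt=='' and abs(match) > (9-i):
-- 			if i==9:
-- 				resulttxt = str(abs(match)) + 'auf'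
-- 			else:
-- 				resulttxt = str(abs(match)) + '+' + str(9-i)
--
-- 	if match > 0: prettystring = '✔︎ gewonnen [+'+str(abs(match))+'/'+resulttxt+']  ('+prettystring+')'
-- 	elif match < 0: prettystring = '✘ verloren [-'+str(abs(match))+'/'+resulttxt+'] ('+prettystring+')'
-- 	else: prettystring = '⦁ geteilt  ('+prettystring+')'
--
-- 	return prettystring
-- ===== SOURCE B (Python) =====
-- def prettymatch(holes):
--     # Pass 1: symbols with the grouping spaces after indices 2 and 5.
--     pretty = ''.join(
--         ('\u25bc' if h < 0 else '\u25b2' if h > 0 else '\u25e6')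
--         + (' ' if i in (2, 5) else '')
--         for i, h in enumerate(holes))
--     # Pass 2: prefix sums of the running match score.
--     total = 0
--     prefix = []
--     for h in holes:
--         total += h
--         prefix.append(total)
--     # Pass 3: earliest hole whose cumulative lead exceeds the holes left.
--     resulttxt = ''
--     for i, c in enumerate(prefix):
--         if abs(c) > 9 - (i + 1):
--             resulttxt = str(abs(c)) + ('auf' if i + 1 == 9 else '+' + str(9 - (i + 1)))
--             break
--     if total > 0:
--         return '\u2714\ufe0e gewonnen [+' + str(total) + '/' + resulttxt + ']  (' + pretty + ')'
--     if total < 0: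
--         return '\u2718 verloren [-' + str(-total) + '/' + resulttxt + '] (' + pretty + ')'
--     return '\u2981 geteilt  (' + pretty + ')'
-- ===== Notes on version B (the rewrite author's own statement) =====
-- stated objective: alternative
-- what changed: A computes everything in one stateful loop carrying (prettystring, resulttxt, i, match); B decomposes the job into three independent passes — a join over enumerated hole symbols, a prefix-sum pass, and an early-exit search over the enumerated prefix sums for the first decided hole — then assembles the wrapper from the total.
import Mathlib
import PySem

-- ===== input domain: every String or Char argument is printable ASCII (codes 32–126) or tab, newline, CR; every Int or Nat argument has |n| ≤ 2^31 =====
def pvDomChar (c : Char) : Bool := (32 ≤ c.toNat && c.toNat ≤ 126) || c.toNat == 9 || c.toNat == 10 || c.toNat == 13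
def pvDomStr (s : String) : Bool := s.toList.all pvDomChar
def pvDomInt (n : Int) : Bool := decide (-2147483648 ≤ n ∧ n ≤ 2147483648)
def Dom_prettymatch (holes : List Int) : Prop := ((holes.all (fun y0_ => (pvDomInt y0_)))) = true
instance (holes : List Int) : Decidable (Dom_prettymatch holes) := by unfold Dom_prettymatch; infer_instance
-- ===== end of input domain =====

-- B replaces A's single stateful loop by three separate passes (symbol join, prefix sums,
-- earliest-decision search) — objective: alternative decomposition, same cost.

-- ===== PORT A =====
-- loop body of A's single for-loop, state = (prettystring, resulttxt, i, match)
def pmStepA (st : String × String × Int × Int) (hole : Int) : String × String × Int × Int :=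
  let m := st.2.2.2 + hole
  let pretty :=
    if hole < 0 then st.1 ++ "▼"
    else if hole > 0 then st.1 ++ "▲"
    else st.1 ++ "◦"
  let pretty := if st.2.2.1 = 2 ∨ st.2.2.1 = 5 then pretty ++ " " else pretty
  let i := st.2.2.1 + 1
  let res :=
    if st.2.1 = "" ∧ |m| > 9 - i then
      if i = 9 then PySem.Int.toStr |m| ++ "auf"
      else PySem.Int.toStr |m| ++ "+" ++ PySem.Int.toStr (9 - i)
    else st.2.1
  (pretty, res, i, m)

def prettymatch (holes : List Int) : String :=
  let st := holes.foldl pmStepA ("", "", 0, 0)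
  if st.2.2.2 > 0 then
    "✔︎ gewonnen [+" ++ PySem.Int.toStr |st.2.2.2| ++ "/" ++ st.2.1 ++ "]  (" ++ st.1 ++ ")"
  else if st.2.2.2 < 0 then
    "✘ verloren [-" ++ PySem.Int.toStr |st.2.2.2| ++ "/" ++ st.2.1 ++ "] (" ++ st.1 ++ ")"
  else
    "⦁ geteilt  (" ++ st.1 ++ ")"

-- ===== PORT B =====
-- symbol for one hole (with the grouping space after indices 2 and 5)
def pmSym (i : Int) (h : Int) : String :=
  (if h < 0 then "▼" else if h > 0 then "▲" else "◦") ++ (if i = 2 ∨ i = 5 then " " else "")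

-- pass 3 of Source B: first enumerated prefix sum whose lead exceeds the holes left
def pmFind : List (Int × Int) → String
  | [] => ""
  | (i, c) :: rest =>
    if |c| > 9 - (i + 1) then
      PySem.Int.toStr |c| ++ (if i + 1 = 9 then "auf" else "+" ++ PySem.Int.toStr (9 - (i + 1)))
    else pmFind rest

-- pass 2 of Source B: running total and list of prefix sums
def pmStepB (st : Int × List Int) (h : Int) : Int × List Int :=
  (st.1 + h, st.2 ++ [st.1 + h])

def prettymatch_alt (holes : List Int) : String :=
  let pretty := PySem.Str.join "" ((PySem.List.enumerate holes).map (fun p => pmSym p.1 p.2))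
  let tp := holes.foldl pmStepB (0, [])
  let resulttxt := pmFind (PySem.List.enumerate tp.2)
  if tp.1 > 0 then
    "✔︎ gewonnen [+" ++ PySem.Int.toStr tp.1 ++ "/" ++ resulttxt ++ "]  (" ++ pretty ++ ")"
  else if tp.1 < 0 then
    "✘ verloren [-" ++ PySem.Int.toStr (-tp.1) ++ "/" ++ resulttxt ++ "] (" ++ pretty ++ ")"
  else
    "⦁ geteilt  (" ++ pretty ++ ")"

-- ===== PRECONDITION & SPEC =====
def Spec_prettymatch (holes : List Int) (out : String) : Prop := out = prettymatch_alt holes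
instance (holes : List Int) (out : String) : Decidable (Spec_prettymatch holes out) := by unfold Spec_prettymatch; infer_instance

-- ===== CLAIM (what is proved, stated in full; the proofs are below) =====
def Claim_equal_prettymatch : Prop := ∀ (holes : List Int), Dom_prettymatch holes → Spec_prettymatch holes (prettymatch holes)

-- ===== LEMMAS AND PROOFS =====

-- prefix sums of t started from m (characterises both A's running `match` and B's prefix list)
def pmPrefixFrom : Int → List Int → List Int
  | _, [] => []
  | m, h :: t => (m + h) :: pmPrefixFrom (m + h) t

theorem pmJoin_empty_cons_chars (cs : List Char) (l : List (List Char)) :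
    PySem.Chars.join [] (cs :: l) = cs ++ PySem.Chars.join [] l := by
  cases l with
  | nil => rw [PySem.Chars.join_singleton, PySem.Chars.join_nil]; simp
  | cons d t => rw [PySem.Chars.join_cons_cons]; simp

theorem pmJoin_empty_cons (s : String) (l : List String) :
    PySem.Str.join "" (s :: l) = s ++ PySem.Str.join "" l := by
  simp [PySem.Str.join, pmJoin_empty_cons_chars]

theorem pmFoldB_eq (t : List Int) : ∀ (m : Int) (l : List Int),
    t.foldl pmStepB (m, l) = (m + t.sum, l ++ pmPrefixFrom m t) := by
  induction t with
  | nil => intro m l; simp [pmPrefixFrom]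
  | cons h t ih => intro m l; simp [pmStepB, pmPrefixFrom, ih, add_assoc]

theorem pmAppend_right_ne (s t : String) (h : t ≠ "") : s ++ t ≠ "" := by
  intro he
  have h2 := congrArg String.toList he
  simp at h2
  exact h h2.2

theorem pmAppend_left_ne (s t : String) (h : s ≠ "") : s ++ t ≠ "" := by
  intro he
  have h2 := congrArg String.toList he
  simp at h2
  exact h h2.1

theorem pmLoopA_eq (t : List Int) : ∀ (pretty res : String) (i m : Int),
    t.foldl pmStepA (pretty, res, i, m) =
      (pretty ++ PySem.Str.join "" ((PySem.List.enumerate t i).map (fun p => pmSym p.1 p.2)),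
       (if res = "" then pmFind (PySem.List.enumerate (pmPrefixFrom m t) i) else res),
       i + t.length, m + t.sum) := by
  induction t with
  | nil =>
    intro pretty res i m
    simp [pmPrefixFrom, PySem.List.enumerate_nil, pmFind, PySem.Str.join, PySem.Chars.join_nil]
  | cons h t ih =>
    intro pretty res i m
    rw [List.foldl_cons, pmStepA, ih]
    rw [PySem.List.enumerate_cons, List.map_cons, pmJoin_empty_cons]
    refine Prod.ext ?_ (Prod.ext ?_ (Prod.ext ?_ ?_))
    · -- prettystring component
      show _ = pretty ++ (pmSym i h ++ _)
      simp only [pmSym]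
      split_ifs <;> simp_all [String.append_assoc]
    · -- resulttxt component
      show (if (if res = "" ∧ |m + h| > 9 - (i + 1) then
              if i + 1 = 9 then PySem.Int.toStr |m + h| ++ "auf"
              else PySem.Int.toStr |m + h| ++ "+" ++ PySem.Int.toStr (9 - (i + 1))
            else res) = "" then
          pmFind (PySem.List.enumerate (pmPrefixFrom (m + h) t) (i + 1))
        else
          (if res = "" ∧ |m + h| > 9 - (i + 1) then
              if i + 1 = 9 then PySem.Int.toStr |m + h| ++ "auf"
              else PySem.Int.toStr |m + h| ++ "+" ++ PySem.Int.toStr (9 - (i + 1))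
            else res)) =
        if res = "" then pmFind (PySem.List.enumerate (pmPrefixFrom m (h :: t)) i) else res
      rw [show pmPrefixFrom m (h :: t) = (m + h) :: pmPrefixFrom (m + h) t from rfl,
          PySem.List.enumerate_cons]
      by_cases hres : res = ""
      · by_cases hcond : |m + h| > 9 - (i + 1)
        · have hne : (if i + 1 = 9 then PySem.Int.toStr |m + h| ++ "auf"
              else PySem.Int.toStr |m + h| ++ "+" ++ PySem.Int.toStr (9 - (i + 1))) ≠ "" := by
            split_ifs
            · exact pmAppend_right_ne _ _ (by decide)
            · exact pmAppend_left_ne _ _ (pmAppend_right_ne _ _ (by decide))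
          rw [if_pos (⟨hres, hcond⟩ : res = "" ∧ |m + h| > 9 - (i + 1)),
              if_neg hne, if_pos hres]
          simp only [pmFind, if_pos hcond]
          split_ifs <;> simp [String.append_assoc]
        · subst hres
          simp [pmFind, hcond]
      · simp [hres]
    · simp; omega
    · simp; ring

theorem prettymatch_spec : Claim_equal_prettymatch := by
  intro holes _
  unfold Spec_prettymatch prettymatch prettymatch_alt
  rw [show ((0:Int), (0:Int)) = ((0:Int), (0:Int)) from rfl]
  rw [pmLoopA_eq, pmFoldB_eq]
  simp only [zero_add, List.nil_append]
  by_cases h1 : holes.sum > 0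
  · rw [if_pos h1, if_pos h1, abs_of_pos h1]
    simp
  · by_cases h2 : holes.sum < 0
    · rw [if_neg h1, if_pos h2, if_neg h1, if_pos h2, abs_of_neg h2]
      simp
    · rw [if_neg h1, if_neg h2, if_neg h1, if_neg h2]
      simp
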